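-- pv_equiv track=rewrite | github.com/RawipornS/ProblemSolving | week4/BigO.py | calculate_sums
-- ===== SOURCE A (Python) =====
-- def calculate_sums(N):
--     sum_odd = 0
--     sum_even = 0
--     for i in range(1, N + 1):
--         if i % 2 == 0:
--             sum_even += i
--         else:
--             sum_odd += i
--     return sum_odd, sum_even
-- ===== SOURCE B (Python) =====
-- def calculate_sums(N):
--     m = N if N > 0 else 0
--     k = m // 2
--     return ((m + 1) // 2) ** 2, k * (k + 1)
-- ===== Notes on version B (the rewrite author's own statement) =====
-- stated objective: faster
-- what changed: Replaced the linear parity loop with closed-form arithmetic-series formulas (square of the odd count for the odd sum, product formula for the even sum), computed in constant time.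
import Mathlib
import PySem

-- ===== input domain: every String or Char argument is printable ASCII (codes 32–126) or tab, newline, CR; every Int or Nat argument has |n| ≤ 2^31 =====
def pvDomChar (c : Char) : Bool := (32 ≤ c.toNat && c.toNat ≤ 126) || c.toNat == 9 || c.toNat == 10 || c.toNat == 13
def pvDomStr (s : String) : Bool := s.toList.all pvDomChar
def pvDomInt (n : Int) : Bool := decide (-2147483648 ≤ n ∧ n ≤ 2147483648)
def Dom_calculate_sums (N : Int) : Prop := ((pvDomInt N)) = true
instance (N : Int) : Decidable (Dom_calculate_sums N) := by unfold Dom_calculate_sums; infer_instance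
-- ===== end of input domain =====

-- B replaces A's O(N) parity loop with O(1) closed-form arithmetic-series formulas.

-- ===== PORT A =====
def calculate_sums (N : Int) : Int × Int :=
  (PySem.List.pyRange 1 (N + 1) 1).foldl
    (fun (s : Int × Int) i =>
      if PySem.Int.mod i 2 = 0 then (s.1, s.2 + i) else (s.1 + i, s.2))
    (0, 0)

-- ===== PORT B =====
def calculate_sums_alt (N : Int) : Int × Int :=
  let m : Int := if N > 0 then N else 0
  let k : Int := PySem.Int.floordiv m 2
  ((PySem.Int.floordiv (m + 1) 2) ^ 2, k * (k + 1))

-- ===== PRECONDITION & SPEC =====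
def Spec_calculate_sums (N : Int) (out : Int × Int) : Prop := out = calculate_sums_alt N
instance (N : Int) (out : Int × Int) : Decidable (Spec_calculate_sums N out) := by unfold Spec_calculate_sums; infer_instance

-- ===== CLAIM (what is proved, stated in full; the proofs are below) =====
def Claim_equal_calculate_sums : Prop := ∀ (N : Int), Dom_calculate_sums N → Spec_calculate_sums N (calculate_sums N)

-- ===== LEMMAS AND PROOFS =====

-- the loop over range(1, n+1) computes the closed forms (Nat version, by induction)
theorem calc_loop_closed (n : Nat) :
    ((List.range n).map (fun k : Nat => (1 : Int) + (k : Int))).foldl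
      (fun (s : Int × Int) i =>
        if PySem.Int.mod i 2 = 0 then (s.1, s.2 + i) else (s.1 + i, s.2))
      (0, 0)
    = ((((n + 1) / 2 : Nat) : Int) ^ 2, (((n / 2 : Nat) : Int)) * (((n / 2 : Nat) : Int) + 1)) := by
  induction n with
  | zero => simp
  | succ n ih =>
    rw [List.range_succ, List.map_append, List.foldl_append, ih]
    simp only [List.map_cons, List.map_nil, List.foldl_cons, List.foldl_nil]
    have hmod : PySem.Int.mod ((1 : Int) + n) 2 = (((n + 1) % 2 : Nat) : Int) := by
      have := PySem.Int.mod_natCast (n + 1) 2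
      rw [← this]; push_cast; ring_nf
    rw [hmod]
    rcases Nat.even_or_odd n with ⟨m, hm⟩ | ⟨m, hm⟩ <;> subst hm
    · -- n = m + m, new element 1+n is odd
      have hc : ((m + m + 1) % 2 : Nat) = 1 := by omega
      have d1 : ((m + m + 1) / 2 : Nat) = m := by omega
      have d2 : ((m + m) / 2 : Nat) = m := by omega
      have d3 : ((m + m + 1 + 1) / 2 : Nat) = m + 1 := by omega
      rw [hc, d1, d2, d3]
      rw [if_neg (by norm_num)]
      simp only [Prod.mk.injEq]
      constructor
      · push_cast; try ring
      · push_cast; try ring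
    · -- n = 2m+1, new element 1+n is even
      have hc : ((2 * m + 1 + 1) % 2 : Nat) = 0 := by omega
      have d1 : ((2 * m + 1 + 1) / 2 : Nat) = m + 1 := by omega
      have d2 : ((2 * m + 1) / 2 : Nat) = m := by omega
      have d3 : ((2 * m + 1 + 1 + 1) / 2 : Nat) = m + 1 := by omega
      rw [hc, d1, d2, d3]
      rw [if_pos (by norm_num)]
      simp only [Prod.mk.injEq]
      constructor
      · push_cast; try ring
      · push_cast; try ring

-- ===== VERDICT (by name: the statement is the Claim_ definition above) =====
theorem calculate_sums_spec : Claim_equal_calculate_sums := by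
  intro N _
  unfold Spec_calculate_sums calculate_sums calculate_sums_alt
  rw [PySem.List.pyRange_one]
  by_cases hN : N > 0
  · simp only [hN, if_pos]
    have hn : N = (N.toNat : Int) := by omega
    rw [show (N + 1 - 1) = N by ring, hn, Int.toNat_natCast, calc_loop_closed]
    have e1 : PySem.Int.floordiv ((N.toNat : Int) + 1) 2 = (((N.toNat + 1) / 2 : Nat) : Int) := by
      have := PySem.Int.floordiv_natCast (N.toNat + 1) 2
      rw [← this]; push_cast; ring_nf
    have e2 : PySem.Int.floordiv ((N.toNat : Int)) 2 = (((N.toNat) / 2 : Nat) : Int) :=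
      PySem.Int.floordiv_natCast N.toNat 2
    rw [e1, e2]
  · simp only [hN, if_false]
    have h0 : (N + 1 - 1).toNat = 0 := by omega
    rw [show (N + 1 - 1) = N by ring]
    rw [show N.toNat = 0 by omega]
    simp [PySem.Int.floordiv]
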